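-- pv_equiv track=rewrite | github.com/YerCodeWorld/eduscript | single/blanks.py | parse_blanks_pattern
-- ===== SOURCE A (Python) =====
-- from typing import List, Optional
--
-- def parse_blanks_pattern(s):
--     """
--     Search for blanks using a pointer approach just because it's different and looks dope
--     ... (She *takes* a shower and *goes* to work.)
--     Also it's useful no? I mean * are not something you can pair like brackets
--     """
--
--     blanks: List[str] = []
--     pointer = 0
--     current_blank = []
--     in_blank = False
--
--     while pointer < len(s):
--
--         char = s[pointer]
--         # Avoiding some possible dumb case that someone mistakenly writtes consecutive * chars
--         if char == "*" and pointer != 0 and char == s[pointer-1]: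
--             pointer += 1
--             continue
--
--         if char == "*":
--             if in_blank:
--                 blanks.append(''.join(current_blank))
--                 current_blank = []
--                 in_blank = False
--             else:
--                 in_blank = True
--         elif in_blank:
--             current_blank.append(char)
--
--         pointer += 1
--
--     return blanks
-- ===== SOURCE B (Python) =====
-- def parse_blanks_pattern(s):
--     # Tokenize-and-slice: collapse runs of '*' (drop a '*' whose predecessor is '*'),
--     # split on '*', and keep the odd-indexed tokens except a trailing unclosed one.
--     collapsed = s[:1] + ''.join(b for a, b in zip(s, s[1:]) if not (a == '*' and b == '*'))
--     toks = collapsed.split('*')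
--     return [t for i, t in enumerate(toks) if i % 2 == 1 and i < len(toks) - 1]
-- ===== Notes on version B (the rewrite author's own statement) =====
-- stated objective: simpler
-- what changed: Replaces A's character-by-character pointer state machine (in_blank flag, current_blank accumulator) by a tokenize-and-slice approach: collapse runs of asterisks to one, split on the asterisk, and keep the odd-indexed tokens except a trailing unclosed one.
import Mathlib
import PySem

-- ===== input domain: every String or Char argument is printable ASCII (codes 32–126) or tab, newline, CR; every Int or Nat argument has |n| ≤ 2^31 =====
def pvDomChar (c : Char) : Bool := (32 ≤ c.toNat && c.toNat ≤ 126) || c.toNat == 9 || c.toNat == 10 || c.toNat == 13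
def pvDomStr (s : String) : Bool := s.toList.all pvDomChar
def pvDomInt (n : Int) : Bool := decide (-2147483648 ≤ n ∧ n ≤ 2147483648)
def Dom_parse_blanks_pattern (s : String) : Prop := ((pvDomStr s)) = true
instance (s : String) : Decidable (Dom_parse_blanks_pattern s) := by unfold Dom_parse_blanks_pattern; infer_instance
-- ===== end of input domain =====

-- B replaces A's character-by-character pointer state machine by collapse-runs-of-'*',
-- split on '*', and keep the odd-indexed tokens except a trailing unclosed one (objective: simpler).

-- ===== PORT A =====
-- the while loop over `pointer`; s[pointer-1] is read as cs[pointer-1]? (only reached when pointer ≠ 0, so it is always `some`)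
def pvLoopA (cs : List Char) (pointer : Nat) (blanks : List String) (cur : List Char) (inb : Bool) : List String :=
  if h : pointer < cs.length then
    let char := cs[pointer]
    if char == '*' && pointer != 0 && (cs[pointer - 1]? == some char) then
      pvLoopA cs (pointer + 1) blanks cur inb
    else if char == '*' then
      if inb then pvLoopA cs (pointer + 1) (blanks ++ [String.ofList cur]) [] false
      else pvLoopA cs (pointer + 1) blanks cur true
    else if inb then pvLoopA cs (pointer + 1) blanks (cur ++ [char]) inb
    else pvLoopA cs (pointer + 1) blanks cur inb
  else blanks
termination_by cs.length - pointer

def parse_blanks_pattern (s : String) : List String :=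
  pvLoopA s.toList 0 [] [] false

-- ===== PORT B =====
-- collapsed = s[:1] + ''.join(b for a, b in zip(s, s[1:]) if not (a == '*' and b == '*'));
-- toks = collapsed.split('*')  (single-char separator: List.splitOn is exact here);
-- [t for i, t in enumerate(toks) if i % 2 == 1 and i < len(toks) - 1]
def parse_blanks_pattern_alt (s : String) : List String :=
  let cs := s.toList
  let collapsed := PySem.List.slice cs none (some 1) ++
    ((cs.zip (PySem.List.slice cs (some 1) none)).filter
      (fun p => !(p.1 == '*' && p.2 == '*'))).map Prod.snd
  let toks := List.splitOn '*' collapsed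
  ((PySem.List.enumerate toks).filter
      (fun p => PySem.Int.mod p.1 2 == 1 && decide (p.1 < (toks.length : Int) - 1))).map
    (fun p => String.ofList p.2)

-- ===== PRECONDITION & SPEC =====
def Spec_parse_blanks_pattern (s : String) (out : List String) : Prop := out = parse_blanks_pattern_alt s
instance (s : String) (out : List String) : Decidable (Spec_parse_blanks_pattern s out) := by unfold Spec_parse_blanks_pattern; infer_instance

-- ===== CLAIM (what is proved, stated in full; the proofs are below) =====
def Claim_equal_parse_blanks_pattern : Prop := ∀ (s : String), Dom_parse_blanks_pattern s → Spec_parse_blanks_pattern s (parse_blanks_pattern s)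

-- ===== LEMMAS AND PROOFS =====

-- A's machine rephrased over the remaining characters, with `ps` = "the previous raw character is '*'"
def pvMstep : Bool → List Char → List String → List Char → Bool → List String
  | _, [], b, _, _ => b
  | ps, c :: t, b, cur, inb =>
    if c == '*' && ps then pvMstep true t b cur inb
    else if c == '*' then
      if inb then pvMstep true t (b ++ [String.ofList cur]) [] false
      else pvMstep true t b cur true
    else if inb then pvMstep false t b (cur ++ [c]) inb
    else pvMstep false t b cur inb

-- the same machine with the consecutive-'*' skip removed
def pvM0 : List Char → List String → List Char → Bool → List String
  | [], b, _, _ => b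
  | c :: t, b, cur, inb =>
    if c == '*' then
      if inb then pvM0 t (b ++ [String.ofList cur]) [] false
      else pvM0 t b cur true
    else if inb then pvM0 t b (cur ++ [c]) inb
    else pvM0 t b cur inb

-- collapse runs of '*' given whether the previous raw character was '*'
def pvCollapse : Bool → List Char → List Char
  | _, [] => []
  | ps, c :: t => if c == '*' && ps then pvCollapse true t else c :: pvCollapse (c == '*') t

-- tokens kept by the fresh machine when outside a blank: odd positions, except a trailing unclosed one
def pvOutside {α : Type} : List α → List α
  | [] => []
  | [_] => []
  | [_, _] => []
  | _ :: b :: rest => b :: pvOutside rest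

-- tokens kept when inside a blank with partial content `cur`
def pvInside (cur : List Char) : List (List Char) → List (List Char)
  | [] => []
  | [_] => []
  | t0 :: rest => (cur ++ t0) :: pvOutside rest

lemma pvLoopA_aux (fuel : Nat) : ∀ (cs : List Char) (n : Nat), cs.length - n ≤ fuel →
    ∀ (b : List String) (cur : List Char) (inb : Bool),
    pvLoopA cs n b cur inb = pvMstep (decide (n ≠ 0) && (cs[n - 1]? == some '*')) (cs.drop n) b cur inb := by
  induction fuel with
  | zero =>
    intro cs n hle b cur inb
    have h : ¬ n < cs.length := by omega
    rw [pvLoopA]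
    simp [h, List.drop_eq_nil_of_le (by omega : cs.length ≤ n), pvMstep]
  | succ f ih =>
    intro cs n hle b cur inb
    rw [pvLoopA]
    by_cases h : n < cs.length
    · simp only [dif_pos h]
      have hdrop : cs.drop n = cs[n] :: cs.drop (n + 1) := List.drop_eq_getElem_cons h
      have hnext : (decide (n + 1 ≠ 0) && (cs[(n + 1) - 1]? == some '*')) = (cs[n] == '*') := by
        simp [List.getElem?_eq_getElem h]
      have hrec := fun b cur inb => ih cs (n + 1) (by omega) b cur inb
      rw [hdrop]
      by_cases hc : (cs[n] == '*') = true
      · have hstar : cs[n] = '*' := by simpa using hc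
        by_cases hps : (decide (n ≠ 0) && (cs[n - 1]? == some '*')) = true
        · rw [hstar]
          simp only [pvMstep, hrec, hnext, hstar, BEq.rfl, Bool.true_and, if_true]
          obtain ⟨hn0, hprev⟩ : n ≠ 0 ∧ cs[n - 1]? = some '*' := by simpa using hps
          simp [hn0, hprev]
        · rw [hstar]
          simp only [pvMstep, hrec, hnext, hstar, BEq.rfl, Bool.true_and]
          have hcond : (n != 0 && cs[n - 1]? == some '*') = false := by simpa using hps
          simp only [hcond, Bool.false_eq_true, if_false]
          simp
          intro hn0 hprev
          exact absurd (by simp [hn0, hprev]) hps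
      · simp only [pvMstep, hrec, hnext]
        simp [hc]
    · simp only [dif_neg h]
      rw [List.drop_eq_nil_of_le (by omega : cs.length ≤ n)]
      rfl

lemma pvLoopA_eq_mstep (cs : List Char) (n : Nat) (b : List String) (cur : List Char) (inb : Bool) :
    pvLoopA cs n b cur inb = pvMstep (decide (n ≠ 0) && (cs[n - 1]? == some '*')) (cs.drop n) b cur inb :=
  pvLoopA_aux (cs.length - n) cs n (by omega) b cur inb

lemma pvMstep_eq_m0 (cs : List Char) (ps : Bool) (b : List String) (cur : List Char) (inb : Bool) :
    pvMstep ps cs b cur inb = pvM0 (pvCollapse ps cs) b cur inb := by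
  induction cs generalizing ps b cur inb with
  | nil => rfl
  | cons c t ih =>
    by_cases hskip : (c == '*' && ps) = true
    · simp [pvMstep, pvCollapse, hskip, ih]
    · by_cases hc : (c == '*') = true
      · have hps : ps = false := by cases ps <;> simp_all
        subst hps
        cases inb <;> simp [pvMstep, pvCollapse, pvM0, hc, ih]
      · cases inb <;> simp [pvMstep, pvCollapse, pvM0, hc, ih]

lemma pvOutside_cons_irrel {α : Type} (x y : α) (rest : List α) :
    pvOutside (x :: rest) = pvOutside (y :: rest) := by
  cases rest with
  | nil => rfl
  | cons v r => cases r <;> rfl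

lemma pvM0_split (cs : List Char) (b : List String) (cur : List Char) (inb : Bool)
    (hcur : inb = false → cur = []) :
    pvM0 cs b cur inb = b ++ (if inb then pvInside cur (List.splitOn '*' cs)
                              else pvOutside (List.splitOn '*' cs)).map String.ofList := by
  induction cs generalizing b cur inb with
  | nil => cases inb <;> simp [pvM0, pvInside, pvOutside, List.splitOn]
  | cons c t ih =>
    have hne : List.splitOn '*' t ≠ [] := List.splitOnP_ne_nil _ t
    by_cases hc : (c == '*') = true
    · have hsplit : List.splitOn '*' (c :: t) = [] :: List.splitOn '*' t := by
        simp [List.splitOn, List.splitOnP_cons, hc]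
      cases hsp : List.splitOn '*' t with
      | nil => exact absurd hsp hne
      | cons u r =>
        cases inb with
        | true =>
          simp only [pvM0, hc, if_true, ih _ _ false (fun _ => rfl), hsplit, hsp, pvInside,
            List.map_cons]
          simp
        | false =>
          have hcur0 : cur = [] := hcur rfl
          subst hcur0
          simp only [pvM0, hc, if_true, ih _ _ true (by simp), hsplit, hsp]
          cases r with
          | nil => simp [pvInside, pvOutside]
          | cons v r' => simp [pvInside, pvOutside]
    · have hsplit : List.splitOn '*' (c :: t) = (List.splitOn '*' t).modifyHead (c :: ·) := by
        simp [List.splitOn, List.splitOnP_cons, hc]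
      cases hsp : List.splitOn '*' t with
      | nil => exact absurd hsp hne
      | cons u r =>
        cases inb with
        | true =>
          simp only [pvM0, hc, ih _ _ true (by simp), hsplit, hsp,
            List.modifyHead_cons]
          cases r with
          | nil => simp [pvInside]
          | cons v r' => simp [pvInside, List.append_assoc]
        | false =>
          have hcur0 : cur = [] := hcur rfl
          subst hcur0
          simp only [pvM0, hc, ih _ _ false (fun _ => rfl), hsplit, hsp,
            List.modifyHead_cons]
          simp [pvOutside_cons_irrel (c :: u) u]

lemma pvZip_collapse (t : List Char) (a : Char) :
    (((a :: t).zip t).filter (fun p => !(p.1 == '*' && p.2 == '*'))).map Prod.snd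
      = pvCollapse (a == '*') t := by
  induction t generalizing a with
  | nil => rfl
  | cons c t ih =>
    simp only [List.zip_cons_cons, List.filter_cons]
    by_cases h : (a == '*' && c == '*') = true
    · have hc : (c == '*') = true := (Bool.and_eq_true _ _ |>.mp h).2
      have ha : (a == '*') = true := (Bool.and_eq_true _ _ |>.mp h).1
      have h2 := ih c
      rw [hc] at h2
      simpa [pvCollapse, ha, hc] using h2
    · have hfalse : (c == '*' && a == '*') = false := by
        cases h1 : (a == '*') <;> cases h2 : (c == '*') <;> simp_all
      have hb : (!((a, c).1 == '*' && (a, c).2 == '*')) = true := by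
        cases h1 : (a == '*') <;> cases h2 : (c == '*') <;> simp_all
      have h2 := ih c
      simp only [Bool.not_and] at h2
      simp [pvCollapse, hfalse, hb, h2]

lemma pvEnum_filter {α : Type} (toks : List α) (k N : Int) (hk : 0 ≤ k)
    (hm : PySem.Int.mod k 2 = 0) (hN : N = k + toks.length - 1) :
    ((PySem.List.enumerate toks k).filter
        (fun p => PySem.Int.mod p.1 2 == 1 && decide (p.1 < N))).map Prod.snd
      = pvOutside toks := by
  have hios : ∀ a : Int, PySem.Int.mod a 2 = a % 2 :=
    fun a => PySem.Int.mod_eq_emod_of_pos (by norm_num)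
  have hm' : k % 2 = 0 := by rw [← hios]; exact hm
  induction toks using pvOutside.induct generalizing k with
  | case1 => simp [PySem.List.enumerate, pvOutside]
  | case2 a =>
    simp [PySem.List.enumerate, pvOutside]
    omega
  | case3 a b =>
    simp at hN
    simp [PySem.List.enumerate, pvOutside]
    omega
  | case4 a b rest hne ih =>
    have hrne : rest ≠ [] := fun h => hne h
    have hlen : 1 ≤ (rest.length : Int) := by
      cases rest with | nil => exact absurd rfl hrne | cons v r => simp
    simp at hN
    have h1 : (k + 1) % 2 = 1 := by omega
    have h2 : k + 1 < N := by omega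
    have ihr := ih (k + 2) (by omega) (by rw [hios]; omega) (by omega)
    simp [PySem.List.enumerate, hm', h1, h2, pvOutside] at ihr ⊢
    simpa [add_assoc] using ihr

lemma pvCollapsedB (cs : List Char) :
    PySem.List.slice cs none (some 1) ++
      ((cs.zip (PySem.List.slice cs (some 1) none)).filter
        (fun p => !(p.1 == '*' && p.2 == '*'))).map Prod.snd
      = pvCollapse false cs := by
  cases cs with
  | nil => rfl
  | cons a t =>
    have h1 : PySem.List.slice (a :: t) none (some 1) = [a] := by simp [pysem]
    have h2 : PySem.List.slice (a :: t) (some 1) none = t := by simp [pysem]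
    rw [h1, h2, pvZip_collapse t a]
    simp [pvCollapse]

-- ===== VERDICT (by name: the statement is the Claim_ definition above) =====
theorem parse_blanks_pattern_spec : Claim_equal_parse_blanks_pattern := by
  unfold Claim_equal_parse_blanks_pattern Spec_parse_blanks_pattern
  intro s _
  unfold parse_blanks_pattern parse_blanks_pattern_alt
  rw [pvLoopA_eq_mstep]
  simp only [Nat.zero_sub, List.drop_zero]
  rw [show (decide ((0:Nat) ≠ 0) && (s.toList[0 - 1]? == some '*')) = false by simp]
  rw [pvMstep_eq_m0, pvM0_split _ _ _ _ (fun _ => rfl)]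
  rw [pvCollapsedB]
  rw [← pvEnum_filter (List.splitOn '*' (pvCollapse false s.toList)) 0
        ((List.splitOn '*' (pvCollapse false s.toList)).length - 1)
        (by norm_num) (by decide) (by ring)]
  simp [List.map_map, Function.comp]
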